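-- pv_equiv track=rewrite | github.com/sajanshrestha/leetcode | easy_leetcode_problems.py | yes_no
-- ===== SOURCE A (Python) =====
-- def yes_no(arr):
--     result = []
--     while arr:
--         even_list = [arr[i] for i in range(len(arr)) if i % 2 == 0]
--         new_list = [arr[i] for i in range(len(arr)) if i % 2 != 0]
--         result += even_list
--         arr = new_list
--     return result
-- ===== SOURCE B (Python) =====
-- def yes_no(arr):
--     # single strided-gather pass: level k collects original indices 2^k-1, stepping 2^(k+1)
--     n = len(arr)
--     result = []
--     k = 0
--     while (1 << k) - 1 < n:
--         j = (1 << k) - 1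
--         while j < n:
--             result.append(arr[j])
--             j += (1 << (k + 1))
--         k += 1
--     return result
-- ===== Notes on version B (the rewrite author's own statement) =====
-- stated objective: alternative
-- what changed: Instead of repeatedly de-interleaving the list (rebuilding even- and odd-indexed sublists each round), B emits the same permutation in one pass over strided original indices: level k gathers arr[2^k-1], arr[2^k-1+2^(k+1)], ..., so no intermediate lists are ever built.
import Mathlib
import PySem

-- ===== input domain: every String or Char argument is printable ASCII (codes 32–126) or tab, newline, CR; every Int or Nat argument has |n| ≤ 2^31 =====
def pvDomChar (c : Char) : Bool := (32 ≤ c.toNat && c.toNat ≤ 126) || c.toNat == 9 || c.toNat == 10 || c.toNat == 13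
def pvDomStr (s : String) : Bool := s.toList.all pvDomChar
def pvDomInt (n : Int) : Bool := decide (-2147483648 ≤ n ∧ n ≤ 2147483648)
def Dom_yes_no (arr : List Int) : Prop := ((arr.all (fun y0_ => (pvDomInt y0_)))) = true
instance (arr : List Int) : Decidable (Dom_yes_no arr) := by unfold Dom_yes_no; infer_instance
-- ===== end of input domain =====

-- B re-implements A's repeated even/odd de-interleaving as a single strided-index gather
-- (level k reads original indices 2^k-1, 2^k-1+2^(k+1), ...); equal output, no intermediate lists.

-- ===== PORT A =====
-- [arr[i] for i in range(len(arr)) if i % 2 == 0]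
def evensOf (arr : List Int) : List Int :=
  (PySem.List.pyRange 0 (arr.length : Int) 1).filterMap
    (fun i => if PySem.Int.mod i 2 = 0 then PySem.List.pyGet? arr i else none)

-- [arr[i] for i in range(len(arr)) if i % 2 != 0]
def oddsOf (arr : List Int) : List Int :=
  (PySem.List.pyRange 0 (arr.length : Int) 1).filterMap
    (fun i => if PySem.Int.mod i 2 ≠ 0 then PySem.List.pyGet? arr i else none)

-- termination helper for the while loop: the odd-indexed sublist is strictly shorter
theorem oddsOf_length_lt (arr : List Int) (h : arr ≠ []) :
    (oddsOf arr).length < arr.length := by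
  have hn : 0 < arr.length := List.length_pos_iff.mpr h
  have h0 : (0 : Int) < (arr.length : Int) := by exact_mod_cast hn
  unfold oddsOf
  rw [PySem.List.pyRange_one_cons h0]
  rw [List.filterMap_cons_none (by simp [PySem.Int.mod])]
  calc ((PySem.List.pyRange 1 (arr.length : Int) 1).filterMap _).length
      ≤ (PySem.List.pyRange 1 (arr.length : Int) 1).length := List.length_filterMap_le _ _
    _ = ((arr.length : Int) - 1).toNat := PySem.List.length_pyRange_one 1 _
    _ < arr.length := by omega

-- while arr: result += even_list; arr = new_list
def yes_no_loop (arr result : List Int) : List Int :=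
  if arr = [] then result
  else yes_no_loop (oddsOf arr) (result ++ evensOf arr)
termination_by arr.length
decreasing_by exact oddsOf_length_lt arr (by assumption)

def yes_no (arr : List Int) : List Int := yes_no_loop arr []

-- ===== PORT B =====
-- inner while: j = 2^k-1; while j < n: result.append(arr[j]); j += 1 << (k+1)
def innerB (arr : List Int) (k j : Nat) (acc : List Int) : List Int :=
  if h : j < arr.length then innerB arr k (j + 2 ^ (k + 1)) (acc ++ [arr[j]]) else acc
termination_by arr.length - j
decreasing_by
  have : 0 < 2 ^ (k + 1) := Nat.two_pow_pos _
  omega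

-- outer while: while (1 << k) - 1 < n
def outerB (arr : List Int) (k : Nat) (acc : List Int) : List Int :=
  if 2 ^ k - 1 < arr.length then outerB arr (k + 1) (innerB arr k (2 ^ k - 1) acc) else acc
termination_by arr.length + 1 - 2 ^ k
decreasing_by
  have h1 : 1 ≤ 2 ^ k := Nat.one_le_two_pow
  omega

def yes_no_alt (arr : List Int) : List Int := outerB arr 0 []

-- ===== PRECONDITION & SPEC =====
def Spec_yes_no (arr : List Int) (out : List Int) : Prop := out = yes_no_alt arr
instance (arr : List Int) (out : List Int) : Decidable (Spec_yes_no arr out) := by unfold Spec_yes_no; infer_instance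

-- ===== CLAIM (what is proved, stated in full; the proofs are below) =====
def Claim_equal_yes_no : Prop := ∀ (arr : List Int), Dom_yes_no arr → Spec_yes_no arr (yes_no arr)

-- ===== LEMMAS AND PROOFS =====

-- proof-side strided gather: elements at indices j, j+s+1, j+2(s+1), ...
def gather (arr : List Int) (j s : Nat) : List Int :=
  if h : j < arr.length then arr[j] :: gather arr (j + s + 1) s else []
termination_by arr.length - j

-- two-at-a-time list induction, used for facts about even/odd de-interleaving
theorem twoStepInd {P : List Int → Prop} (h0 : P []) (h1 : ∀ a, P [a])
    (h2 : ∀ a b l, P l → P (a :: b :: l)) : ∀ l, P l := by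
  intro l
  induction hn : l.length using Nat.strong_induction_on generalizing l with
  | _ n ih =>
    match l with
    | [] => exact h0
    | [a] => exact h1 a
    | a :: b :: t => exact h2 a b t (ih t.length (by simp [← hn]) t rfl)

theorem gather_nil (j s : Nat) : gather [] j s = [] := by
  rw [gather]; simp

theorem gather_stop (arr : List Int) (j s : Nat) (h : ¬ j < arr.length) :
    gather arr j s = [] := by
  rw [gather]; simp [h]

theorem gather_step (arr : List Int) (j s : Nat) (h : j < arr.length) :
    gather arr j s = arr[j] :: gather arr (j + s + 1) s := by
  rw [gather]; simp [h]

-- shifting the start of a gather past a dropped head element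
theorem gather_tail (x : Int) (l : List Int) (j s : Nat) :
    gather (x :: l) (j + 1) s = gather l j s := by
  induction hn : l.length - j using Nat.strong_induction_on generalizing j with
  | _ n ih =>
    by_cases h : j < l.length
    · rw [gather_step _ _ _ (by simp; omega), gather_step _ _ _ h]
      have e : j + 1 + s + 1 = (j + s + 1) + 1 := by omega
      rw [e, ih (l.length - (j + s + 1)) (by omega) _ rfl]
      simp
    · rw [gather_stop _ _ _ (by simp; omega), gather_stop _ _ _ h]

theorem dOf_cons (a b : Int) (l : List Int) :
    gather (a :: b :: l) 1 1 = b :: gather l 1 1 := by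
  rw [gather_step _ _ _ (by simp),
    show gather (a :: b :: l) (1 + 1 + 1) 1 = gather (b :: l) (1 + 1) 1 from
      gather_tail a (b :: l) (1 + 1) 1,
    show gather (b :: l) (1 + 1) 1 = gather l 1 1 from gather_tail b l 1 1]
  simp

theorem eOf_cons (a b : Int) (l : List Int) :
    gather (a :: b :: l) 0 1 = a :: gather l 0 1 := by
  rw [gather_step _ _ _ (by simp),
    show gather (a :: b :: l) (0 + 1 + 1) 1 = gather (b :: l) (0 + 1) 1 from
      gather_tail a (b :: l) (0 + 1) 1,
    show gather (b :: l) (0 + 1) 1 = gather l 0 1 from gather_tail b l 0 1]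
  simp

theorem dOf_length (arr : List Int) : (gather arr 1 1).length = arr.length / 2 := by
  induction arr using twoStepInd with
  | h0 => simp [gather_nil]
  | h1 a => rw [gather_stop _ _ _ (by simp)]; simp
  | h2 a b l ih => rw [dOf_cons]; simp [ih]; omega

theorem dOf_getElem? (arr : List Int) (j : Nat) :
    (gather arr 1 1)[j]? = arr[2 * j + 1]? := by
  induction arr using twoStepInd generalizing j with
  | h0 => simp [gather_nil]
  | h1 a =>
    rw [gather_stop _ _ _ (by simp)]
    simp
  | h2 a b l ih =>
    rw [dOf_cons]
    match j with
    | 0 => simp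
    | j + 1 =>
      simp only [List.getElem?_cons_succ, ih]
      have e : 2 * (j + 1) = 2 * j + 1 + 1 := by omega
      rw [e, List.getElem?_cons_succ]

-- the gather of the odd-indexed sublist is a doubled-stride gather of the original
theorem gather_dOf (arr : List Int) (j s : Nat) :
    gather (gather arr 1 1) j s = gather arr (2 * j + 1) (2 * s + 1) := by
  induction hn : arr.length / 2 - j using Nat.strong_induction_on generalizing j with
  | _ n ih =>
    by_cases h : j < arr.length / 2
    · have hj : j < (gather arr 1 1).length := by rw [dOf_length]; exact h
      have h2 : 2 * j + 1 < arr.length := by omega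
      rw [gather_step _ _ _ hj, gather_step _ _ _ h2]
      refine congrArg₂ _ ?_ ?_
      · have := dOf_getElem? arr j
        rw [List.getElem?_eq_getElem hj, List.getElem?_eq_getElem h2] at this
        exact Option.some_injective _ this
      · rw [ih (arr.length / 2 - (j + s + 1)) (by omega) _ rfl]
        have : 2 * (j + s + 1) + 1 = 2 * j + 1 + (2 * s + 1) + 1 := by omega
        rw [this]
    · rw [gather_stop _ _ _ (by rw [dOf_length]; exact h),
        gather_stop _ _ _ (by omega)]

-- the Nat-indexed forms of A's comprehensions, proved equal to stride-2 gathers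
theorem range_two_step (n : Nat) :
    List.range (n + 2) = 0 :: 1 :: (List.range n).map (fun i => i + 1 + 1) := by
  rw [List.range_succ_eq_map, List.range_succ_eq_map, List.map_cons, List.map_map]
  rfl

theorem evens_nat : ∀ (arr : List Int),
    (List.range arr.length).filterMap (fun i => if i % 2 = 0 then arr[i]? else none)
      = gather arr 0 1 := by
  intro arr
  induction arr using twoStepInd with
  | h0 => simp [gather_nil]
  | h1 a =>
    rw [gather_step _ _ _ (by simp), gather_stop _ _ _ (by simp)]
    simp [List.range_one]
  | h2 a b l ih =>
    rw [show (a :: b :: l).length = l.length + 2 by simp,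
      range_two_step, List.filterMap_cons, List.filterMap_cons, List.filterMap_map]
    have he : (fun i => if i % 2 = 0 then (a :: b :: l)[i]? else none) ∘ (fun i => i + 1 + 1)
        = fun i => if i % 2 = 0 then l[i]? else none := by
      funext i
      have hm : (i + 1 + 1) % 2 = i % 2 := by omega
      simp [Function.comp, hm]
    rw [he, ih, eOf_cons]
    simp

theorem odds_nat : ∀ (arr : List Int),
    (List.range arr.length).filterMap (fun i => if i % 2 = 0 then none else arr[i]?)
      = gather arr 1 1 := by
  intro arr
  induction arr using twoStepInd with
  | h0 => simp [gather_nil]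
  | h1 a =>
    rw [gather_stop _ _ _ (by simp)]
    simp [List.range_one]
  | h2 a b l ih =>
    rw [show (a :: b :: l).length = l.length + 2 by simp,
      range_two_step, List.filterMap_cons, List.filterMap_cons, List.filterMap_map]
    have he : (fun i => if i % 2 = 0 then none else (a :: b :: l)[i]?) ∘ (fun i => i + 1 + 1)
        = fun i => if i % 2 = 0 then none else l[i]? := by
      funext i
      have hm : (i + 1 + 1) % 2 = i % 2 := by omega
      simp [Function.comp, hm]
    rw [he, ih, dOf_cons]
    simp

-- A's comprehensions are stride-2 gathers
theorem evensOf_eq (arr : List Int) : evensOf arr = gather arr 0 1 := by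
  unfold evensOf
  rw [PySem.List.pyRange_zero_nat, List.filterMap_map, ← evens_nat arr]
  congr 1
  funext i
  simp only [Function.comp]
  by_cases hp : i % 2 = 0
  · have hd : (2 : Int) ∣ (i : Int) := by omega
    simp [hp, hd]
  · have hd : ¬ (2 : Int) ∣ (i : Int) := by omega
    simp [hp, hd]

theorem oddsOf_eq (arr : List Int) : oddsOf arr = gather arr 1 1 := by
  unfold oddsOf
  rw [PySem.List.pyRange_zero_nat, List.filterMap_map, ← odds_nat arr]
  congr 1
  funext i
  simp only [Function.comp]
  by_cases hp : i % 2 = 0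
  · have hd : ¬ ((i : Int) % 2 = 1) := by omega
    simp [hp, hd]
  · have hd : (i : Int) % 2 = 1 := by omega
    simp [hp, hd]

theorem loopA_stop (res : List Int) : yes_no_loop [] res = res := by
  rw [yes_no_loop]; simp

theorem loopA_step (arr res : List Int) (h : arr ≠ []) :
    yes_no_loop arr res = yes_no_loop (oddsOf arr) (res ++ evensOf arr) := by
  rw [yes_no_loop, if_neg h]

theorem outerB_stop (arr : List Int) (k : Nat) (acc : List Int)
    (h : ¬ 2 ^ k - 1 < arr.length) : outerB arr k acc = acc := by
  rw [outerB, if_neg h]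

theorem outerB_step (arr : List Int) (k : Nat) (acc : List Int)
    (h : 2 ^ k - 1 < arr.length) :
    outerB arr k acc = outerB arr (k + 1) (innerB arr k (2 ^ k - 1) acc) := by
  rw [outerB, if_pos h]

-- accumulator lemmas
theorem innerB_eq (arr : List Int) (k j : Nat) (acc : List Int) :
    innerB arr k j acc = acc ++ gather arr j (2 ^ (k + 1) - 1) := by
  induction hn : arr.length - j using Nat.strong_induction_on generalizing j acc with
  | _ n ih =>
    by_cases h : j < arr.length
    · rw [innerB, dif_pos h, gather_step _ _ _ h,
        ih (arr.length - (j + 2 ^ (k + 1))) (by have := Nat.two_pow_pos (k + 1); omega) _ _ rfl]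
      have hs : j + 2 ^ (k + 1) = j + (2 ^ (k + 1) - 1) + 1 := by
        have := Nat.two_pow_pos (k + 1); omega
      rw [hs]; simp
    · rw [innerB, dif_neg h, gather_stop _ _ _ h]; simp

theorem outerB_acc (arr : List Int) (k : Nat) (acc : List Int) :
    outerB arr k acc = acc ++ outerB arr k [] := by
  induction hn : arr.length + 1 - 2 ^ k using Nat.strong_induction_on generalizing k acc with
  | _ n ih =>
    by_cases h : 2 ^ k - 1 < arr.length
    · have h1 : 1 ≤ 2 ^ k := Nat.one_le_two_pow
      have h2 : 2 ^ (k + 1) = 2 * 2 ^ k := by rw [pow_succ]; ring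
      rw [outerB_step _ _ _ h, outerB_step _ _ [] h,
        ih (arr.length + 1 - 2 ^ (k + 1)) (by omega) _ _ rfl,
        ih (arr.length + 1 - 2 ^ (k + 1)) (by omega) (k + 1) (innerB arr k (2 ^ k - 1) []) rfl,
        innerB_eq, innerB_eq]
      simp
    · rw [outerB_stop _ _ _ h, outerB_stop _ _ _ h]; simp

theorem yes_no_loop_acc (arr res : List Int) :
    yes_no_loop arr res = res ++ yes_no_loop arr [] := by
  induction hn : arr.length using Nat.strong_induction_on generalizing arr res with
  | _ n ih =>
    by_cases h : arr = []
    · subst h; rw [loopA_stop, loopA_stop]; simp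
    · rw [loopA_step _ _ h, loopA_step _ [] h,
        ih (oddsOf arr).length (by rw [← hn]; exact oddsOf_length_lt arr h) _ _ rfl,
        ih (oddsOf arr).length (by rw [← hn]; exact oddsOf_length_lt arr h) (oddsOf arr) ([] ++ evensOf arr) rfl]
      simp

-- one outer level of B consumes exactly one de-interleaving round of A
theorem outer_shift (N : Nat) : ∀ (k : Nat) (arr : List Int), arr.length + 1 ≤ 2 ^ k + N →
    outerB arr (k + 1) [] = outerB (gather arr 1 1) k [] := by
  induction N with
  | zero =>
    intro k arr hN
    have h1 : 1 ≤ 2 ^ k := Nat.one_le_two_pow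
    have h2 : 2 ^ (k + 1) = 2 * 2 ^ k := by rw [pow_succ]; ring
    rw [outerB_stop _ _ _ (by omega), outerB_stop _ _ _ (by rw [dOf_length]; omega)]
  | succ N ih =>
    intro k arr hN
    have h1 : 1 ≤ 2 ^ k := Nat.one_le_two_pow
    have h2 : 2 ^ (k + 1) = 2 * 2 ^ k := by rw [pow_succ]; ring
    by_cases h : 2 ^ (k + 1) - 1 < arr.length
    · rw [outerB_step arr (k + 1) [] h,
        outerB_step (gather arr 1 1) k [] (by rw [dOf_length]; omega),
        outerB_acc arr (k + 1 + 1), outerB_acc (gather arr 1 1) (k + 1),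
        innerB_eq arr (k + 1), innerB_eq (gather arr 1 1) k,
        ih (k + 1) arr (by omega), gather_dOf arr]
      have e1 : 2 * (2 ^ k - 1) + 1 = 2 ^ (k + 1) - 1 := by omega
      have e2 : 2 * (2 ^ (k + 1) - 1) + 1 = 2 ^ (k + 1 + 1) - 1 := by
        have h3 : 2 ^ (k + 1 + 1) = 2 * 2 ^ (k + 1) := by rw [pow_succ]; ring
        have h4 : 1 ≤ 2 ^ (k + 1) := Nat.one_le_two_pow
        omega
      rw [e1, e2]
    · rw [outerB_stop _ _ _ h, outerB_stop _ _ _ (by rw [dOf_length]; omega)]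

theorem main_eq (arr : List Int) : yes_no_loop arr [] = outerB arr 0 [] := by
  induction hn : arr.length using Nat.strong_induction_on generalizing arr with
  | _ n ih =>
    by_cases h : arr = []
    · subst h; rw [loopA_stop, outerB_stop _ _ _ (by simp)]
    · have hl : 0 < arr.length := List.length_pos_iff.mpr h
      rw [loopA_step _ _ h, yes_no_loop_acc, oddsOf_eq, evensOf_eq,
        ih (gather arr 1 1).length (by rw [← hn, dOf_length]; omega) _ rfl,
        outerB_step arr 0 [] (by simpa using hl),
        outerB_acc arr (0 + 1), innerB_eq arr 0,
        outer_shift arr.length 0 arr (by omega)]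
      norm_num

-- ===== VERDICT (by name: the statement is the Claim_ definition above) =====
theorem yes_no_spec : Claim_equal_yes_no := by
  intro arr _
  unfold Spec_yes_no yes_no yes_no_alt
  exact main_eq arr
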